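-- pv_equiv track=rewrite | github.com/RSteendam/vid-ccg | vid-ccg/scripts/wsj/remove_long_sentences.py | get_long_sentences
-- ===== SOURCE A (Python) =====
-- def get_long_sentences(ptb_tagged, sentence_limit=None):
--     long_sentence_ids = []
--     id = None
--     sentence_length = 0
--     for line in ptb_tagged:
--         if line.startswith("wsj"):
--             if sentence_length > sentence_limit:
--                 long_sentence_ids.append(id)
--             id = line.strip()
--             sentence_length = 0
--         else:
--             tag = line.strip().split("\t")[-1]
--
--             if tag != "." and tag != "":
--                 sentence_length += 1
--     if sentence_length > sentence_limit:
--         long_sentence_ids.append(id)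
--
--     return long_sentence_ids
-- ===== SOURCE B (Python) =====
-- def _split_before_wsj(lines):
--     # span: longest prefix of non-"wsj" lines, and the remainder starting at the boundary
--     k = 0
--     while k < len(lines) and not lines[k].startswith("wsj"):
--         k += 1
--     return lines[:k], lines[k:]
--
--
-- def _token_count(chunk):
--     return sum(1 for line in chunk
--                if line.strip().split("\t")[-1] not in (".", ""))
--
--
-- def get_long_sentences(ptb_tagged, sentence_limit=None):
--     # Chunked scan: repeatedly split off the block of tag lines before the next
--     # "wsj" header, count the whole block at once, then consume the header.
--     result = []
--     sid = None
--     rest = ptb_tagged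
--     while True:
--         chunk, rest = _split_before_wsj(rest)
--         if _token_count(chunk) > sentence_limit:
--             result.append(sid)
--         if not rest:
--             return result
--         sid = rest[0].strip()
--         rest = rest[1:]
-- ===== Notes on version B (the rewrite author's own statement) =====
-- stated objective: alternative
-- what changed: Replaced A's per-line state machine (a running token counter mutated line by line, tested at each header) by a chunked scan: repeatedly split off the whole block of tag lines before the next 'wsj' header (a span), count the block in one go, then consume the header; no running per-line counter is carried.
-- outside the precondition, e.g. on get_long_sentences(['a\tNN'], 0): A returns [None], B returns [None]; on get_long_sentences([], None): A raises TypeError, B raises TypeError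
import Mathlib
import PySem

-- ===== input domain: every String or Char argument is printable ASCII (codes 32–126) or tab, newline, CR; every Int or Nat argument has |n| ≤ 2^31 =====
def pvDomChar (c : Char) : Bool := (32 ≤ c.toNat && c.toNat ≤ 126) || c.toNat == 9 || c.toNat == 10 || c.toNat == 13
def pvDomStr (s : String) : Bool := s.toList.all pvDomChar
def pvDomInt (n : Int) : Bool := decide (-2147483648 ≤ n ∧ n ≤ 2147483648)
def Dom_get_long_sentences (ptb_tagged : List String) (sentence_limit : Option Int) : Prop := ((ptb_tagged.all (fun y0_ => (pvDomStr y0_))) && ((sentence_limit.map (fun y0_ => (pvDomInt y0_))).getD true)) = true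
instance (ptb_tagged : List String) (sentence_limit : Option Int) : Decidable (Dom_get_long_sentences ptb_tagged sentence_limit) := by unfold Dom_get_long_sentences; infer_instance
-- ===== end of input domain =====

-- B replaces A's per-line state machine (a running token counter mutated line by line) by a
-- chunked scan: span off the block before the next "wsj" header, count the block at once,
-- consume the header; same cost, different decomposition.  Objective: alternative.

-- ===== PORT A =====
-- tag of a non-"wsj" line: line.strip().split("\t")[-1]  (split never returns [], so getD "" is unreachable)
def pvTag (line : String) : String :=
  (PySem.List.pyGet? ((PySem.Str.split? (PySem.Str.strip line) "\t").getD []) (-1)).getD ""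

-- A's loop, carrying (id, sentence_length, long_sentence_ids); Python's `id = None` before the
-- first "wsj" line is carried as Option String; appending a None id (excluded by Pre_) appends "".
def pvALoop (lines : List String) (id : Option String) (len : Int) (acc : List String) (limit : Int) : List String :=
  match lines with
  | [] => if len > limit then acc ++ [id.getD ""] else acc
  | line :: rest =>
    if PySem.Str.startswith line "wsj" then
      pvALoop rest (some (PySem.Str.strip line)) 0
        (if len > limit then acc ++ [id.getD ""] else acc) limit
    else
      let tag := pvTag line
      if tag ≠ "." ∧ tag ≠ "" then pvALoop rest id (len + 1) acc limit
      else pvALoop rest id len acc limit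

def get_long_sentences (ptb_tagged : List String) (sentence_limit : Option Int) : List String :=
  match sentence_limit with
  | none => []   -- Python raises TypeError here; excluded by Pre_
  | some limit => pvALoop ptb_tagged none 0 [] limit

-- ===== PORT B =====
-- B's per-line predicate from _token_count: line counts as a token
def pvCountable (line : String) : Bool :=
  decide (pvTag line ≠ "." ∧ pvTag line ≠ "")

-- B's boundary predicate from _split_before_wsj's inner test
def pvNotWsj (line : String) : Bool := ! PySem.Str.startswith line "wsj"

-- B's while-loop: _split_before_wsj's index loop computes exactly the span at the first
-- "wsj" line, ported as the corresponding takeWhile/dropWhile pair; _token_count's sum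
-- over the chunk is ported as countP; then the header is consumed and we recurse on the tail.
def pvBLoop (rest : List String) (sid : Option String) (acc : List String) (limit : Int) : List String :=
  let chunk := rest.takeWhile pvNotWsj
  let acc' := if ((chunk.countP pvCountable : Nat) : Int) > limit then acc ++ [sid.getD ""] else acc
  match h : rest.dropWhile pvNotWsj with
  | [] => acc'
  | l :: t => pvBLoop t (some (PySem.Str.strip l)) acc' limit
termination_by rest.length
decreasing_by
  have hle : (rest.dropWhile pvNotWsj).length ≤ rest.length := by
    simpa using List.length_dropWhile_le (p := pvNotWsj) (l := rest)
  simp [h] at hle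
  omega

def get_long_sentences_alt (ptb_tagged : List String) (sentence_limit : Option Int) : List String :=
  match sentence_limit with
  | none => []   -- Python raises TypeError here; excluded by Pre_
  | some limit => pvBLoop ptb_tagged none [] limit

-- ===== PRECONDITION & SPEC =====
-- Pre_ excludes sentence_limit=None, where Python raises TypeError on '>', and inputs whose
-- leading group of lines before any "wsj" line has more countable tokens than the limit, on
-- which A's returned list contains None, which is not a value of the declared str type.
def Pre_get_long_sentences (ptb_tagged : List String) (sentence_limit : Option Int) : Prop :=
  sentence_limit.isSome = true ∧
  ((ptb_tagged.takeWhile (fun l => ¬ PySem.Str.startswith l "wsj")).countP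
      (fun l => pvTag l ≠ "." ∧ pvTag l ≠ "") : Int) ≤ sentence_limit.getD 0
instance (ptb_tagged : List String) (sentence_limit : Option Int) : Decidable (Pre_get_long_sentences ptb_tagged sentence_limit) := by unfold Pre_get_long_sentences; infer_instance

def pvWitness_get_long_sentences : List String × Option Int :=
  (["wsj_0001", "The\tDT", "dog\tNN", ".\t."], some 1)

def Spec_get_long_sentences (ptb_tagged : List String) (sentence_limit : Option Int) (out : List String) : Prop := out = get_long_sentences_alt ptb_tagged sentence_limit
instance (ptb_tagged : List String) (sentence_limit : Option Int) (out : List String) : Decidable (Spec_get_long_sentences ptb_tagged sentence_limit out) := by unfold Spec_get_long_sentences; infer_instance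

-- ===== CLAIM (what is proved, stated in full; the proofs are below) =====
def Claim_equal_get_long_sentences : Prop := ∀ (ptb_tagged : List String) (sentence_limit : Option Int), Dom_get_long_sentences ptb_tagged sentence_limit → Pre_get_long_sentences ptb_tagged sentence_limit → Spec_get_long_sentences ptb_tagged sentence_limit (get_long_sentences ptb_tagged sentence_limit)

-- ===== LEMMAS AND PROOFS =====

-- A's loop over a header-free block: it just adds the block's countable-line count to len.
lemma pvALoop_no_wsj (limit : Int) :
    ∀ (chunk : List String), (∀ l ∈ chunk, pvNotWsj l = true) →
    ∀ (id : Option String) (len : Int) (acc : List String),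
    pvALoop chunk id len acc limit =
      if len + (chunk.countP pvCountable : Nat) > limit then acc ++ [id.getD ""] else acc := by
  intro chunk
  induction chunk with
  | nil => intro _ id len acc; simp [pvALoop]
  | cons line rest ih =>
    intro hall id len acc
    have hw : PySem.Str.startswith line "wsj" = false := by
      have := hall line (by simp)
      simpa [pvNotWsj] using this
    have hrest : ∀ l ∈ rest, pvNotWsj l = true := fun l hl => hall l (by simp [hl])
    by_cases hc : pvTag line ≠ "." ∧ pvTag line ≠ ""
    · have hcb : pvCountable line = true := by rw [pvCountable]; exact decide_eq_true hc
      rw [pvALoop]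
      simp only [hw, Bool.false_eq_true, if_false, if_pos hc]
      rw [ih hrest]
      simp only [List.countP_cons, hcb, if_true]
      apply if_congr ?_ rfl rfl
      push_cast
      constructor <;> intro h <;> omega
    · have hcb : pvCountable line = false := by
        rw [pvCountable, decide_eq_false_iff_not]; exact hc
      rw [pvALoop]
      simp only [hw, Bool.false_eq_true, if_false, if_neg hc]
      rw [ih hrest, List.countP_cons, hcb]
      simp

-- A's loop across a header: flush, reset, continue.
lemma pvALoop_across (limit : Int) :
    ∀ (chunk : List String), (∀ l ∈ chunk, pvNotWsj l = true) →
    ∀ (l : String), PySem.Str.startswith l "wsj" = true →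
    ∀ (rest : List String) (id : Option String) (len : Int) (acc : List String),
    pvALoop (chunk ++ l :: rest) id len acc limit =
      pvALoop rest (some (PySem.Str.strip l)) 0
        (if len + (chunk.countP pvCountable : Nat) > limit then acc ++ [id.getD ""] else acc) limit := by
  intro chunk
  induction chunk with
  | nil =>
    intro _ l hl rest id len acc
    have hl' : PySem.Chars.startswith l.toList ['w', 's', 'j'] = true := hl
    rw [List.nil_append, pvALoop]
    simp [hl']
  | cons line chs ih =>
    intro hall l hl rest id len acc
    have hw : PySem.Str.startswith line "wsj" = false := by
      have := hall line (by simp)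
      simpa [pvNotWsj] using this
    have hchs : ∀ x ∈ chs, pvNotWsj x = true := fun x hx => hall x (by simp [hx])
    by_cases hc : pvTag line ≠ "." ∧ pvTag line ≠ ""
    · have hcb : pvCountable line = true := by rw [pvCountable]; exact decide_eq_true hc
      rw [List.cons_append, pvALoop]
      simp only [hw, Bool.false_eq_true, if_false, if_pos hc]
      rw [ih hchs l hl]
      simp only [List.countP_cons, hcb, if_true]
      have hcast : (len + ((chs.countP pvCountable + 1 : Nat) : Int)) =
          (len + 1 + ((chs.countP pvCountable : Nat) : Int)) := by push_cast; ring
      rw [hcast]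
    · have hcb : pvCountable line = false := by
        rw [pvCountable, decide_eq_false_iff_not]; exact hc
      rw [List.cons_append, pvALoop]
      simp only [hw, Bool.false_eq_true, if_false, if_neg hc]
      rw [ih hchs l hl, List.countP_cons, hcb]
      simp

-- A's loop (from a fresh counter) equals B's chunked loop.
lemma pvALoop_eq_pvBLoop (limit : Int) :
    ∀ (lines : List String) (id : Option String) (acc : List String),
    pvALoop lines id 0 acc limit = pvBLoop lines id acc limit := by
  intro lines id acc
  generalize hn : lines.length = n
  induction n using Nat.strongRecOn generalizing lines id acc with
  | _ n ih =>
  have hsplit : lines.takeWhile pvNotWsj ++ lines.dropWhile pvNotWsj = lines :=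
    List.takeWhile_append_dropWhile
  have htk : ∀ x ∈ lines.takeWhile pvNotWsj, pvNotWsj x = true :=
    fun x hx => List.mem_takeWhile_imp hx
  rw [pvBLoop]
  cases hd : lines.dropWhile pvNotWsj with
  | nil =>
    rw [hd, List.append_nil] at hsplit
    conv_lhs => rw [← hsplit]
    rw [pvALoop_no_wsj limit _ htk id 0 acc]
    simp only [zero_add]
  | cons l t =>
    have hlw : PySem.Str.startswith l "wsj" = true := by
      have := List.head?_dropWhile_not pvNotWsj lines
      rw [hd] at this
      simp [pvNotWsj] at this
      exact this
    have hlen : t.length < lines.length := by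
      have hle := List.length_dropWhile_le (p := pvNotWsj) (l := lines)
      rw [hd] at hle
      simp at hle
      omega
    rw [hd] at hsplit
    conv_lhs => rw [← hsplit]
    rw [pvALoop_across limit _ htk l hlw]
    subst hn
    rw [ih t.length hlen t (some (PySem.Str.strip l)) _ rfl]
    simp only [zero_add]

theorem get_long_sentences_eq (ptb_tagged : List String) (sentence_limit : Option Int) :
    get_long_sentences ptb_tagged sentence_limit = get_long_sentences_alt ptb_tagged sentence_limit := by
  cases sentence_limit with
  | none => rfl
  | some limit =>
    simp only [get_long_sentences, get_long_sentences_alt, pvALoop_eq_pvBLoop]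

-- ===== VERDICT (by name: the statement is the Claim_ definition above) =====
theorem get_long_sentences_spec : Claim_equal_get_long_sentences := by
  intro ptb_tagged sentence_limit _ _
  unfold Spec_get_long_sentences
  exact get_long_sentences_eq ptb_tagged sentence_limit
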